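-- pv_equiv track=rewrite | github.com/Noe-GT/Zappy | ai/ai/commands.py | go_to_resource
-- ===== SOURCE A (Python) =====
-- def go_to_resource(resource: str, distance: int, direction: str) -> str:
--     commands = []
--
--     if direction == "here":
--         commands.append(f"Take {resource}")
--         return "|".join(commands)
--     if direction == "front":
--         for _ in range(distance):
--             commands.append("Forward")
--     elif direction == "front-right":
--         commands.append("Right")
--         for _ in range(distance):
--             commands.append("Forward")
--     elif direction == "right":
--         commands.append("Right")
--         for _ in range(distance):
--             commands.append("Forward")
--     elif direction == "back-right":
--         commands.append("Right")
--         commands.append("Right")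
--         for _ in range(distance):
--             commands.append("Forward")
--     elif direction == "back":
--         commands.append("Right")
--         commands.append("Right")
--         for _ in range(distance):
--             commands.append("Forward")
--     elif direction == "back-left":
--         commands.append("Right")
--         commands.append("Right")
--         for _ in range(distance):
--             commands.append("Forward")
--     elif direction == "left":
--         commands.append("Left")
--         for _ in range(distance):
--             commands.append("Forward")
--     elif direction == "front-left":
--         commands.append("Left")
--         for _ in range(distance):
--             commands.append("Forward")
--     commands.append(f"Take {resource}")
--     return "|".join(commands)
-- ===== SOURCE B (Python) =====
-- _VALID = {"front", "front-right", "right", "back-right", "back",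
--           "back-left", "left", "front-left"}
--
--
-- def go_to_resource(resource: str, distance: int, direction: str) -> str:
--     # Build the command string directly: no list, no join.
--     out = f"Take {resource}"
--     if direction == "here" or direction not in _VALID:
--         return out
--     out = "Forward|" * distance + out
--     if "back" in direction:
--         return "Right|Right|" + out
--     if "left" in direction:
--         return "Left|" + out
--     if "right" in direction:
--         return "Right|" + out
--     return out  # "front"
-- ===== Notes on version B (the rewrite author's own statement) =====
-- stated objective: alternative
-- what changed: Instead of appending commands to a list and joining, B assembles the result string directly by concatenation: the turn prefix is derived by substring classification of the direction ('back' => Right|Right|, 'left' => Left|, 'right' => Right|) and the walk is string repetition 'Forward|'*distance, with one membership test handling 'here'/unknown directions.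
import Mathlib
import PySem

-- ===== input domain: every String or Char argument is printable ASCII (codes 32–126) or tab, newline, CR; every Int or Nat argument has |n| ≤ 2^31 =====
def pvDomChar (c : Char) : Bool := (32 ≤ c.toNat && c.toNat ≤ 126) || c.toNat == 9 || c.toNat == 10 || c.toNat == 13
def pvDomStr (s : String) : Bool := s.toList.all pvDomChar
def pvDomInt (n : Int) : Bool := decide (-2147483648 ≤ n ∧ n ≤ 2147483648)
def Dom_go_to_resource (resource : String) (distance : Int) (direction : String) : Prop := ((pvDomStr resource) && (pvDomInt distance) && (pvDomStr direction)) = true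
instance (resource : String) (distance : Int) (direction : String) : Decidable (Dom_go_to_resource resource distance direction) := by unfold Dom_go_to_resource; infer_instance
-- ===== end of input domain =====

-- B builds the output string by direct concatenation (substring classification of the
-- direction + string repetition) instead of A's list-append-then-join (objective: alternative).
-- ===== PORT A =====
def go_to_resource (resource : String) (distance : Int) (direction : String) : String :=
  let commands : List String := []
  if direction == "here" then
    let commands := commands ++ ["Take " ++ resource]
    PySem.Str.join "|" commands
  else
    let commands :=
      if direction == "front" then
        (PySem.List.pyRange 0 distance 1).foldl (fun acc _ => acc ++ ["Forward"]) commands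
      else if direction == "front-right" then
        (PySem.List.pyRange 0 distance 1).foldl (fun acc _ => acc ++ ["Forward"]) (commands ++ ["Right"])
      else if direction == "right" then
        (PySem.List.pyRange 0 distance 1).foldl (fun acc _ => acc ++ ["Forward"]) (commands ++ ["Right"])
      else if direction == "back-right" then
        (PySem.List.pyRange 0 distance 1).foldl (fun acc _ => acc ++ ["Forward"]) (commands ++ ["Right"] ++ ["Right"])
      else if direction == "back" then
        (PySem.List.pyRange 0 distance 1).foldl (fun acc _ => acc ++ ["Forward"]) (commands ++ ["Right"] ++ ["Right"])
      else if direction == "back-left" then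
        (PySem.List.pyRange 0 distance 1).foldl (fun acc _ => acc ++ ["Forward"]) (commands ++ ["Right"] ++ ["Right"])
      else if direction == "left" then
        (PySem.List.pyRange 0 distance 1).foldl (fun acc _ => acc ++ ["Forward"]) (commands ++ ["Left"])
      else if direction == "front-left" then
        (PySem.List.pyRange 0 distance 1).foldl (fun acc _ => acc ++ ["Forward"]) (commands ++ ["Left"])
      else commands
    let commands := commands ++ ["Take " ++ resource]
    PySem.Str.join "|" commands

-- ===== PORT B =====
-- Source B's module-level set _VALID
def pvValid : PySem.Set String :=
  PySem.Set.ofList ["front", "front-right", "right", "back-right", "back",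
                    "back-left", "left", "front-left"]

-- hand port of Python string repetition 'Forward|' * distance (exact: n ≤ 0 gives "", else n copies)
def pvStrRepeat (s : String) : Nat → String
  | 0 => ""
  | n + 1 => s ++ pvStrRepeat s n

def go_to_resource_alt (resource : String) (distance : Int) (direction : String) : String :=
  let out := "Take " ++ resource
  if direction == "here" || !(PySem.Set.contains pvValid direction) then out
  else
    let out := pvStrRepeat "Forward|" distance.toNat ++ out
    if PySem.Str.isIn "back" direction then "Right|Right|" ++ out
    else if PySem.Str.isIn "left" direction then "Left|" ++ out
    else if PySem.Str.isIn "right" direction then "Right|" ++ out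
    else out

-- ===== PRECONDITION & SPEC =====
def Spec_go_to_resource (resource : String) (distance : Int) (direction : String) (out : String) : Prop := out = go_to_resource_alt resource distance direction
instance (resource : String) (distance : Int) (direction : String) (out : String) : Decidable (Spec_go_to_resource resource distance direction out) := by unfold Spec_go_to_resource; infer_instance

-- ===== CLAIM =====
def Claim_equal_go_to_resource : Prop := ∀ (resource : String) (distance : Int) (direction : String), Dom_go_to_resource resource distance direction → Spec_go_to_resource resource distance direction (go_to_resource resource distance direction)

-- ===== LEMMAS AND PROOFS =====
-- A's 'for _ in range(distance): commands.append("Forward")' appends (length of the range) Forwards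
theorem fwd_foldl (l : List Int) (acc : List String) :
    l.foldl (fun acc _ => acc ++ ["Forward"]) acc = acc ++ List.replicate l.length "Forward" := by
  induction l generalizing acc with
  | nil => simp
  | cons x xs ih => rw [List.foldl_cons, ih]; simp [List.replicate_succ]

-- each prefix element followed by a '|' separator, flattened to one string
def pvFlat : List String → String
  | [] => ""
  | p :: ps => p ++ "|" ++ pvFlat ps

theorem join_flat (pre : List String) (t : String) :
    PySem.Str.join "|" (pre ++ [t]) = pvFlat pre ++ t := by
  induction pre with
  | nil =>
    apply String.ext
    simp [PySem.Str.join, PySem.Chars.join, List.intercalate, pvFlat]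
  | cons p ps ih =>
    apply String.ext
    have h := congrArg String.toList ih
    simp only [PySem.Str.join, PySem.Chars.join] at h ⊢
    cases ps with
    | nil => simp_all [List.intercalate, List.intersperse_cons₂, pvFlat]
    | cons q qs =>
      simp only [List.cons_append, List.map_cons, List.intercalate,
        List.intersperse_cons₂, List.flatten_cons] at h ⊢
      simp_all [pvFlat]

theorem flat_replicate (n : Nat) :
    pvFlat (List.replicate n "Forward") = pvStrRepeat "Forward|" n := by
  induction n with
  | zero => rfl
  | succ m ih => rw [List.replicate_succ, pvFlat, ih, pvStrRepeat]; rfl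

theorem flat_append (a b : List String) : pvFlat (a ++ b) = pvFlat a ++ pvFlat b := by
  induction a with
  | nil => simp [pvFlat]
  | cons p ps ih => simp [pvFlat, ih, String.append_assoc]

-- the equality each valid-direction branch reduces to
theorem joinEq (pre : List String) (n : Nat) (t : String) :
    PySem.Str.join "|" (pre ++ (List.replicate n "Forward" ++ [t]))
      = pvFlat pre ++ (pvStrRepeat "Forward|" n ++ t) := by
  rw [← List.append_assoc, join_flat, flat_append, flat_replicate, String.append_assoc]

theorem join_single (t : String) : PySem.Str.join "|" [t] = t := by
  simpa [pvFlat] using join_flat [] t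

theorem join_rep (n : Nat) (t : String) :
    PySem.Str.join "|" (List.replicate n "Forward" ++ [t]) = pvStrRepeat "Forward|" n ++ t := by
  simpa [pvFlat] using joinEq [] n t

theorem joinR (n : Nat) (t : String) :
    PySem.Str.join "|" ("Right" :: (List.replicate n "Forward" ++ [t]))
      = "Right|" ++ (pvStrRepeat "Forward|" n ++ t) := by
  simpa [pvFlat, String.append_assoc] using joinEq ["Right"] n t

theorem joinRR (n : Nat) (t : String) :
    PySem.Str.join "|" ("Right" :: "Right" :: (List.replicate n "Forward" ++ [t]))
      = "Right|Right|" ++ (pvStrRepeat "Forward|" n ++ t) := by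
  simpa [pvFlat, String.append_assoc] using joinEq ["Right", "Right"] n t

theorem joinL (n : Nat) (t : String) :
    PySem.Str.join "|" ("Left" :: (List.replicate n "Forward" ++ [t]))
      = "Left|" ++ (pvStrRepeat "Forward|" n ++ t) := by
  simpa [pvFlat, String.append_assoc] using joinEq ["Left"] n t

-- ===== VERDICT =====
set_option maxHeartbeats 2000000 in
theorem go_to_resource_spec : Claim_equal_go_to_resource := by
  intro resource distance direction _
  unfold Spec_go_to_resource go_to_resource go_to_resource_alt
  simp only [fwd_foldl, PySem.List.length_pyRange_one, Int.sub_zero, List.nil_append]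
  split_ifs with h1 h2 h3 h4 h5 h6 h7 h8 h9 <;>
    simp_all [join_single, join_rep, joinR, joinRR, joinL,
      pvValid, PySem.Set.mem_ofList,
      (show PySem.Chars.isIn ['b', 'a', 'c', 'k'] ['f', 'r', 'o', 'n', 't'] = false from by decide),
      (show PySem.Chars.isIn ['l', 'e', 'f', 't'] ['f', 'r', 'o', 'n', 't'] = false from by decide),
      (show PySem.Chars.isIn ['r', 'i', 'g', 'h', 't'] ['f', 'r', 'o', 'n', 't'] = false from by decide),
      (show PySem.Chars.isIn ['b', 'a', 'c', 'k'] ['f', 'r', 'o', 'n', 't', '-', 'r', 'i', 'g', 'h', 't'] = false from by decide),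
      (show PySem.Chars.isIn ['l', 'e', 'f', 't'] ['f', 'r', 'o', 'n', 't', '-', 'r', 'i', 'g', 'h', 't'] = false from by decide),
      (show PySem.Chars.isIn ['r', 'i', 'g', 'h', 't'] ['f', 'r', 'o', 'n', 't', '-', 'r', 'i', 'g', 'h', 't'] = true from by decide),
      (show PySem.Chars.isIn ['b', 'a', 'c', 'k'] ['r', 'i', 'g', 'h', 't'] = false from by decide),
      (show PySem.Chars.isIn ['l', 'e', 'f', 't'] ['r', 'i', 'g', 'h', 't'] = false from by decide),
      (show PySem.Chars.isIn ['r', 'i', 'g', 'h', 't'] ['r', 'i', 'g', 'h', 't'] = true from by decide),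
      (show PySem.Chars.isIn ['b', 'a', 'c', 'k'] ['b', 'a', 'c', 'k', '-', 'r', 'i', 'g', 'h', 't'] = true from by decide),
      (show PySem.Chars.isIn ['b', 'a', 'c', 'k'] ['b', 'a', 'c', 'k'] = true from by decide),
      (show PySem.Chars.isIn ['b', 'a', 'c', 'k'] ['b', 'a', 'c', 'k', '-', 'l', 'e', 'f', 't'] = true from by decide),
      (show PySem.Chars.isIn ['b', 'a', 'c', 'k'] ['l', 'e', 'f', 't'] = false from by decide),
      (show PySem.Chars.isIn ['l', 'e', 'f', 't'] ['l', 'e', 'f', 't'] = true from by decide),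
      (show PySem.Chars.isIn ['b', 'a', 'c', 'k'] ['f', 'r', 'o', 'n', 't', '-', 'l', 'e', 'f', 't'] = false from by decide),
      (show PySem.Chars.isIn ['l', 'e', 'f', 't'] ['f', 'r', 'o', 'n', 't', '-', 'l', 'e', 'f', 't'] = true from by decide)]
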